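-- pv_equiv track=rewrite | github.com/Paul-31415/lac | arith_code.py | nth_order_stats
-- ===== SOURCE A (Python) =====
-- def nth_order_stats(n,toks,start=-1):
--     hist = dict()
--     past = tuple(start for i in range(n))
--     for t in toks:
--         past = (*past[1:],t)
--         if past not in hist:
--             hist[past] = 0
--         hist[past] += 1
--     return hist
-- ===== SOURCE B (Python) =====
-- def nth_order_stats(n, toks, start=-1):
--     w = max(n, 1)
--     seq = [start] * (w - 1) + list(toks)
--     hist = {}
--     for k in range(len(toks)):
--         win = tuple(seq[k:k + w])
--         hist[win] = hist.get(win, 0) + 1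
--     return hist
-- ===== Notes on version B (the rewrite author's own statement) =====
-- stated objective: alternative
-- what changed: Replaces the incrementally shifted rolling-window tuple and the if-not-in/increment dict updates with an up-front padded sequence, stateless per-position slicing of each window, and dict.get-based counting.
import Mathlib
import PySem

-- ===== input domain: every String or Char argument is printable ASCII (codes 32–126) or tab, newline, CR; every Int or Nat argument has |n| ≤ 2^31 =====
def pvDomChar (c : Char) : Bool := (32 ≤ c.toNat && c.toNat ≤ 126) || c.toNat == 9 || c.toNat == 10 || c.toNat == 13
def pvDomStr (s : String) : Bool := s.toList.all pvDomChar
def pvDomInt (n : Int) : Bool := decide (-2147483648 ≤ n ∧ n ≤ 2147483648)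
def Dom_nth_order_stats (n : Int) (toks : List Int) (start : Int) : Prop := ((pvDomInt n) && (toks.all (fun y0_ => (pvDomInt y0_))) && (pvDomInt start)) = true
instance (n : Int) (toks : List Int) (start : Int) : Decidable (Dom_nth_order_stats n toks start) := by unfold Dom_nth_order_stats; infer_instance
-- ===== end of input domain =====

-- B builds the padded sequence up front and slices each window out by position, counting with
-- dict.get, instead of A's incrementally shifted window tuple with if-absent/increment dict
-- updates (alternative decomposition, same cost).

-- ===== PORT A =====
-- the loop of A: carries the shifted window `past` and the histogram dict
def nthA_loop (ts : List Int) (past : List Int) (hist : PySem.Dict (List Int) Int) : PySem.Dict (List Int) Int :=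
  match ts with
  | [] => hist
  | t :: ts' =>
    let past' := past.drop 1 ++ [t]                -- past = (*past[1:], t)
    let h1 := if hist.contains past' then hist else hist.insert past' 0   -- if past not in hist: hist[past] = 0
    nthA_loop ts' past' (h1.insert past' (h1.getD past' 0 + 1))           -- hist[past] += 1

def nth_order_stats (n : Int) (toks : List Int) (start : Int) : List (List Int × Int) :=
  (nthA_loop toks (List.replicate n.toNat start) PySem.Dict.empty).items
  -- past = tuple(start for i in range(n)): range(n) is empty for n ≤ 0, so replicate n.toNat (a count, not an index)

-- ===== PORT B =====
def nth_order_stats_alt (n : Int) (toks : List Int) (start : Int) : List (List Int × Int) :=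
  let w : Nat := (max n 1).toNat                       -- w = max(n, 1)
  let seq := List.replicate (w - 1) start ++ toks      -- seq = [start]*(w-1) + list(toks)
  -- for k in range(len(toks)): win = tuple(seq[k:k+w]); hist[win] = hist.get(win, 0) + 1
  -- seq[k:k+w] with 0 ≤ k and 0 ≤ k+w is exactly drop k, take w
  (((List.range toks.length).map (fun k => (seq.drop k).take w)).foldl
      (fun hist win => hist.insert win (hist.getD win 0 + 1)) PySem.Dict.empty).items

-- ===== PRECONDITION & SPEC =====
def Spec_nth_order_stats (n : Int) (toks : List Int) (start : Int) (out : List (List Int × Int)) : Prop := out = nth_order_stats_alt n toks start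
instance (n : Int) (toks : List Int) (start : Int) (out : List (List Int × Int)) : Decidable (Spec_nth_order_stats n toks start out) := by unfold Spec_nth_order_stats; infer_instance

-- ===== CLAIM (what is proved, stated in full; the proofs are below) =====
def Claim_equal_nth_order_stats : Prop := ∀ (n : Int) (toks : List Int) (start : Int), Dom_nth_order_stats n toks start → Spec_nth_order_stats n toks start (nth_order_stats n toks start)

-- ===== LEMMAS AND PROOFS =====

-- the sequence of window keys A's loop inserts
def aTrace (past : List Int) (ts : List Int) : List (List Int) :=
  match ts with
  | [] => []
  | t :: ts' => (past.drop 1 ++ [t]) :: aTrace (past.drop 1 ++ [t]) ts'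

-- A's per-token dict update is B's get-based counter update
lemma stepA_eq (h : PySem.Dict (List Int) Int) (k : List Int) :
    (if h.contains k then h else h.insert k 0).insert k
      ((if h.contains k then h else h.insert k 0).getD k 0 + 1)
    = h.insert k (h.getD k 0 + 1) := by
  by_cases hc : h.contains k = true
  · simp [hc]
  · simp only [Bool.not_eq_true] at hc
    rw [if_neg (by simp [hc]), PySem.Dict.insert_insert_self, PySem.Dict.getD_insert_self,
      PySem.Dict.getD_of_not_contains _ _ hc]

-- A's loop is B's counting fold over A's key trace
lemma nthA_loop_eq (ts : List Int) : ∀ (past : List Int) (hist : PySem.Dict (List Int) Int),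
    nthA_loop ts past hist
    = (aTrace past ts).foldl (fun d x => d.insert x (d.getD x 0 + 1)) hist := by
  induction ts with
  | nil => intro past hist; rfl
  | cons t ts' ih =>
    intro past hist
    simp only [nthA_loop, aTrace, List.foldl_cons]
    rw [ih, stepA_eq]

-- A's key trace is exactly B's window list of the padded sequence
lemma aTrace_eq (w : Nat) (hw : 1 ≤ w) : ∀ (ts past : List Int),
    (past.drop 1).length = w - 1 →
    aTrace past ts
    = (List.range ts.length).map (fun k => ((past.drop 1 ++ ts).drop k).take w) := by
  intro ts
  induction ts with
  | nil => intro past _; rfl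
  | cons t ts' ih =>
    intro past hp
    have hp' : (past.drop 1 ++ [t]).length = w := by
      simp only [List.length_append, List.length_cons, List.length_nil]
      omega
    have hp'' : ((past.drop 1 ++ [t]).drop 1).length = w - 1 := by
      simp only [List.length_drop, hp']
    rw [aTrace, ih _ hp'', List.length_cons, List.range_succ_eq_map]
    simp only [List.map_cons, List.drop_zero, List.map_map]
    congr 1
    · -- first window = past.drop 1 ++ [t]
      have h1 : past.drop 1 ++ t :: ts' = (past.drop 1 ++ [t]) ++ ts' := by simp
      rw [h1, List.take_left' hp']
    · apply List.map_congr_left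
      intro k _
      simp only [Function.comp_apply]
      have h1 : past.drop 1 ++ t :: ts' = (past.drop 1 ++ [t]) ++ ts' := by simp
      have h2 : ((past.drop 1 ++ [t]) ++ ts').drop (k + 1)
          = ((past.drop 1 ++ [t]).drop 1 ++ ts').drop k := by
        rw [Nat.add_comm k 1, ← List.drop_drop, List.drop_append_of_le_length (by omega)]
      rw [h1, h2]

-- ===== VERDICT (by name: the statement is the Claim_ definition above) =====
theorem nth_order_stats_spec : Claim_equal_nth_order_stats := by
  intro n toks start _
  unfold Spec_nth_order_stats nth_order_stats
  set w : Nat := (max n 1).toNat with hw_def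
  have hw : 1 ≤ w := by
    simp only [hw_def]
    omega
  have hpast : ((List.replicate n.toNat start).drop 1).length = w - 1 := by
    simp only [List.length_drop, List.length_replicate, hw_def]
    omega
  have hdrop : (List.replicate n.toNat start).drop 1 = List.replicate (w - 1) start := by
    rw [List.drop_replicate]
    congr 1
    simp only [hw_def]
    omega
  have hrhs : nth_order_stats_alt n toks start
      = (((List.range toks.length).map
            (fun k => ((List.replicate (w - 1) start ++ toks).drop k).take w)).foldl
          (fun hist win => hist.insert win (hist.getD win 0 + 1)) PySem.Dict.empty).items := rfl
  rw [hrhs, nthA_loop_eq, aTrace_eq w hw toks _ hpast, hdrop]
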